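-- pv_equiv track=rewrite | github.com/Synapse-Coin-HQ-888/poof-proof | optimizers/cdb.py | _create_dynamic_pattern
-- ===== SOURCE A (Python) =====
-- from typing import List, Dict, Optional
-- from typing import Optional, List, Dict
--
-- def _create_dynamic_pattern(size: int) -> List[List[str]]:
--     """Create tiled harmonic dynamic pattern."""
--     base_pattern = ['V', 'W', 'phi', 'e']
--     pattern = []
--     for i in range(size):
--         row = []
--         for j in range(size):
--             idx = (i + j) % len(base_pattern)
--             row.append(base_pattern[idx])
--         pattern.append(row)
--     return pattern
-- ===== SOURCE B (Python) =====
-- def _create_dynamic_pattern(size):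
--     """Create tiled harmonic dynamic pattern."""
--     base_pattern = ['V', 'W', 'phi', 'e']
--     ext = base_pattern * (size // 4 + 2)
--     pattern = []
--     for i in range(size):
--         off = i % 4
--         pattern.append(ext[off:off + size])
--     return pattern
-- ===== Notes on version B (the rewrite author's own statement) =====
-- stated objective: faster
-- what changed: Precomputes one flat cycled sequence ext = base_pattern * (size//4 + 2) and builds each row as a single slice ext[i%4 : i%4+size], eliminating the inner j-loop and its per-cell modulo/index arithmetic.
import Mathlib
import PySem

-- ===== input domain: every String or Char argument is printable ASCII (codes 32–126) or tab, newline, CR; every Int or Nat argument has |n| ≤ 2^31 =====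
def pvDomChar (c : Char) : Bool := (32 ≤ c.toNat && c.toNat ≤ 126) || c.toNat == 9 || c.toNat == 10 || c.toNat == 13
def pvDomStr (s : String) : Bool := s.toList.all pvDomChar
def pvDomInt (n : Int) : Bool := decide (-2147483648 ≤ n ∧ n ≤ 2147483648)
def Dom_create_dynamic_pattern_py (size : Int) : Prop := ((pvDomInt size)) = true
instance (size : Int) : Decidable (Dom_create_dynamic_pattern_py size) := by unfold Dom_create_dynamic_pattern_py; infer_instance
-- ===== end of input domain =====

-- B builds each row as one slice of a precomputed cycled sequence instead of an inner
-- modulo loop per cell (measured faster by a constant factor); return values proved equal.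

-- ===== PORT A =====
def pvBase : List String := ["V", "W", "phi", "e"]

def create_dynamic_pattern_py (size : Int) : List (List String) :=
  (PySem.List.pyRange 0 size 1).foldl (fun pattern i =>
    pattern ++ [(PySem.List.pyRange 0 size 1).foldl (fun row j =>
      row ++ [(PySem.List.pyGet? pvBase (PySem.Int.mod (i + j) (pvBase.length : Int))).getD ""]) []]) []

-- ===== PORT B =====
def create_dynamic_pattern_py_alt (size : Int) : List (List String) :=
  let ext := PySem.List.pyRepeat pvBase (PySem.Int.floordiv size 4 + 2)
  (PySem.List.pyRange 0 size 1).foldl (fun pattern i =>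
    let off := PySem.Int.mod i 4
    pattern ++ [PySem.List.slice ext (some off) (some (off + size))]) []

-- ===== PRECONDITION & SPEC =====
def Spec_create_dynamic_pattern_py (size : Int) (out : List (List String)) : Prop := out = create_dynamic_pattern_py_alt size
instance (size : Int) (out : List (List String)) : Decidable (Spec_create_dynamic_pattern_py size out) := by unfold Spec_create_dynamic_pattern_py; infer_instance

-- ===== CLAIM (what is proved, stated in full; the proofs are below) =====
def Claim_equal_create_dynamic_pattern_py : Prop := ∀ (size : Int), Dom_create_dynamic_pattern_py size → Spec_create_dynamic_pattern_py size (create_dynamic_pattern_py size)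

-- ===== LEMMAS AND PROOFS =====

lemma pyRange_nonpos (s : Int) (h : s ≤ 0) : PySem.List.pyRange 0 s 1 = [] := by
  simp only [PySem.List.pyRange]
  norm_num
  intro hs; omega

lemma flatten_replicate_getElem? {α : Type} (xs : List α) (m k : Nat)
    (h : k < m * xs.length) : ((List.replicate m xs).flatten)[k]? = xs[k % xs.length]? := by
  induction m generalizing k with
  | zero => simp at h
  | succ m ih =>
    rw [List.replicate_succ, List.flatten_cons]
    by_cases hk : k < xs.length
    · rw [List.getElem?_append_left hk, Nat.mod_eq_of_lt hk]
    · rw [Nat.not_lt] at hk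
      rw [Nat.succ_mul] at h
      rw [List.getElem?_append_right hk, ih (k - xs.length) (by omega)]
      conv_rhs => rw [← Nat.sub_add_cancel hk]
      rw [Nat.add_mod_right]

-- A's inner loop, as a map over range n
lemma rowA_eq (n i : Nat) :
    (List.map (fun k : Nat => (k : Int)) (List.range n)).foldl (fun row j =>
        row ++ [(PySem.List.pyGet? pvBase (PySem.Int.mod ((i : Int) + j) (pvBase.length : Int))).getD ""]) []
      = (List.range n).map (fun j => (pvBase[(i + j) % 4]?).getD "") := by
  rw [PySem.List.foldl_append_singleton_eq_map, List.map_map]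
  simp only [List.nil_append]
  apply List.map_congr_left
  intro j _
  have h1 : (i : Int) + (j : Int) = ((i + j : Nat) : Int) := by push_cast; ring
  have h2 : (pvBase.length : Int) = ((4 : Nat) : Int) := by norm_num [pvBase]
  rw [Function.comp_apply, h1, h2, PySem.Int.mod_natCast, PySem.List.pyGet?_natCast]

-- B's row: a window of the precomputed cycle equals A's row values
lemma rowB_eq (n i : Nat) :
    PySem.List.slice (PySem.List.pyRepeat pvBase (PySem.Int.floordiv (n : Int) 4 + 2))
        (some (PySem.Int.mod (i : Int) 4)) (some (PySem.Int.mod (i : Int) 4 + (n : Int)))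
      = (List.range n).map (fun j => (pvBase[(i + j) % 4]?).getD "") := by
  have hm : PySem.Int.mod (i : Int) 4 = ((i % 4 : Nat) : Int) := by
    exact_mod_cast PySem.Int.mod_natCast i 4
  have hd : PySem.Int.floordiv (n : Int) 4 + 2 = ((n / 4 + 2 : Nat) : Int) := by
    rw [show (4 : Int) = ((4 : Nat) : Int) from rfl, PySem.Int.floordiv_natCast]
    push_cast
    ring
  rw [hm, hd, PySem.List.slice_natCast_add]
  apply List.ext_getElem?
  intro k
  by_cases hk : k < n
  · rw [List.getElem?_take, if_pos hk, List.getElem?_drop,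
        List.getElem?_map, List.getElem?_range hk]
    have hb : i % 4 + k < (n / 4 + 2) * 4 := by omega
    have := flatten_replicate_getElem? pvBase (n / 4 + 2) (i % 4 + k)
      (by simpa [pvBase] using hb)
    rw [show PySem.List.pyRepeat pvBase ((n / 4 + 2 : Nat) : Int)
          = (List.replicate (n / 4 + 2) pvBase).flatten by
        have ht : ((n / 4 + 2 : Nat) : Int).toNat = n / 4 + 2 := by omega
        simp only [PySem.List.pyRepeat, ht], this]
    have hmod : (i % 4 + k) % pvBase.length = (i + k) % 4 := by
      have : pvBase.length = 4 := by simp [pvBase]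
      rw [this]; omega
    rw [hmod]
    have hlt : (i + k) % 4 < pvBase.length := by
      have : pvBase.length = 4 := by simp [pvBase]
      omega
    rw [Option.map_some, List.getElem?_eq_getElem hlt, Option.getD_some]
  · rw [List.getElem?_take, if_neg hk, List.getElem?_map,
        List.getElem?_eq_none (by simpa using Nat.le_of_not_lt hk)]
    rfl

-- ===== VERDICT (by name: the statement is the Claim_ definition above) =====
theorem create_dynamic_pattern_py_spec : Claim_equal_create_dynamic_pattern_py := by
  intro size _
  unfold Spec_create_dynamic_pattern_py create_dynamic_pattern_py create_dynamic_pattern_py_alt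
  by_cases h : size ≤ 0
  · rw [pyRange_nonpos size h]
    rfl
  · obtain ⟨n, rfl⟩ : ∃ n : Nat, size = (n : Int) :=
      ⟨size.toNat, (Int.toNat_of_nonneg (by omega)).symm⟩
    simp only []
    rw [PySem.List.foldl_append_singleton_eq_map, PySem.List.foldl_append_singleton_eq_map,
        PySem.List.pyRange_zero_natCast, List.map_map, List.map_map, List.nil_append, List.nil_append]
    apply List.map_congr_left
    intro i _
    rw [Function.comp_apply, Function.comp_apply, rowA_eq n i, rowB_eq n i]
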